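-- pv_equiv track=rewrite | github.com/anushka21187/network_path_finder | common.py | network_matrix
-- ===== SOURCE A (Python) =====
-- def network_matrix(r, c):
--
--     matrix = []
--     node_id = 0
--
--     for row_index in range (0, r):
--         matrix_row = []
--         for col_index in range (0, c):
--             matrix_row.append(node_id)
--             node_id = node_id + 1
--         matrix.append(tuple(matrix_row))
--     return tuple(matrix)
-- ===== SOURCE B (Python) =====
-- def network_matrix(r, c):
--     # Build the matrix back-to-front: walk the row index down from r to 1,
--     # compute each row in closed form from its index (ids (i-1)*c .. i*c-1),
--     # then reverse. No running node_id counter and no inner element loop.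
--     rows = []
--     i = r
--     while i > 0:
--         rows.append(tuple(range((i - 1) * c, i * c)))
--         i -= 1
--     rows.reverse()
--     return tuple(rows)
-- ===== Notes on version B (the rewrite author's own statement) =====
-- stated objective: alternative
-- what changed: Replaces the nested loops threading a mutable node_id counter with a back-to-front build: a countdown loop over the row index emits each row in closed form from its index (range((i-1)*c, i*c)), and the row list is reversed at the end; there is no counter and no inner element loop.
import Mathlib
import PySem

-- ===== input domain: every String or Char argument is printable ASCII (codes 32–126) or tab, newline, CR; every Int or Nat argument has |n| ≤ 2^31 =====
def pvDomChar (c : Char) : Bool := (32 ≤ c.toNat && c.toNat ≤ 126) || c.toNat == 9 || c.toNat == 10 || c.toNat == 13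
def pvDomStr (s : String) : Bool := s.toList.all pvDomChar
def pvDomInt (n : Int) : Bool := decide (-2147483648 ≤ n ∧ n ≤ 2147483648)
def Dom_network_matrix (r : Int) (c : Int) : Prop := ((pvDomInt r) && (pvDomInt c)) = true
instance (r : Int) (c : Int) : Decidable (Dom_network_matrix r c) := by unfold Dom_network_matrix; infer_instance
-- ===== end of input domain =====

-- B builds the matrix back-to-front (countdown over the row index, each row in closed form, reverse at the end) instead of threading a node_id counter through nested loops; alternative decomposition, same cost.

-- ===== PORT A =====
-- literal transliteration: outer loop over range(0, r), inner loop over range(0, c),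
-- state = (matrix so far, node_id)
def network_matrix (r : Int) (c : Int) : List (List Int) :=
  ((PySem.List.pyRange 0 r 1).foldl
    (fun (st : List (List Int) × Int) _row_index =>
      let inner := (PySem.List.pyRange 0 c 1).foldl
        (fun (st2 : List Int × Int) _col_index => (st2.1 ++ [st2.2], st2.2 + 1))
        ([], st.2)
      (st.1 ++ [inner.1], inner.2))
    ([], 0)).1

-- ===== PORT B =====
-- the while-loop: i counts down from r; each iteration appends row i (ids (i-1)*c .. i*c-1)
def pvAltLoop (i : Int) (c : Int) (rows : List (List Int)) : List (List Int) :=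
  if 0 < i then
    pvAltLoop (i - 1) c (rows ++ [PySem.List.pyRange ((i - 1) * c) (i * c) 1])
  else rows
termination_by i.toNat
decreasing_by omega

def network_matrix_alt (r : Int) (c : Int) : List (List Int) :=
  (pvAltLoop r c []).reverse

-- ===== PRECONDITION & SPEC =====
def Spec_network_matrix (r : Int) (c : Int) (out : List (List Int)) : Prop := out = network_matrix_alt r c
instance (r : Int) (c : Int) (out : List (List Int)) : Decidable (Spec_network_matrix r c out) := by unfold Spec_network_matrix; infer_instance

-- ===== CLAIM =====
def Claim_equal_network_matrix : Prop := ∀ (r : Int) (c : Int), Dom_network_matrix r c → Spec_network_matrix r c (network_matrix r c)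

-- ===== LEMMAS AND PROOFS =====

-- the inner row loop of A: appends n, n+1, … and advances the counter by the list length
theorem pv_inner_fold {α : Type} (l : List α) (row0 : List Int) (n : Int) :
    l.foldl (fun (st2 : List Int × Int) _ => (st2.1 ++ [st2.2], st2.2 + 1)) (row0, n)
      = (row0 ++ (List.range l.length).map (fun j : Nat => n + (j : Int)), n + l.length) := by
  induction l generalizing row0 n with
  | nil => simp
  | cons a t ih =>
    simp only [List.foldl_cons, ih, List.length_cons, Prod.mk.injEq]
    constructor
    · rw [List.range_succ_eq_map]
      simp [List.map_map, List.append_assoc, Function.comp]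
      intro j _
      ring
    · push_cast; ring

-- the outer loop of A: each iteration emits one row of k consecutive ids and advances by k
theorem pv_outer_fold {α : Type} (l : List α) (k : Nat) (mat0 : List (List Int)) (n : Int) :
    l.foldl
      (fun (st : List (List Int) × Int) _ =>
        let inner := ((List.range k).map (fun j : Nat => st.2 + (j : Int)), st.2 + (k : Int))
        (st.1 ++ [inner.1], inner.2))
      (mat0, n)
      = (mat0 ++ (List.range l.length).map
          (fun i : Nat => (List.range k).map (fun j : Nat => n + (i : Int) * k + (j : Int))),
         n + (l.length : Int) * k) := by
  induction l generalizing mat0 n with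
  | nil => simp
  | cons a t ih =>
    simp only [List.foldl_cons, ih, List.length_cons, Prod.mk.injEq]
    constructor
    · rw [List.range_succ_eq_map]
      simp [List.map_map, List.append_assoc, Function.comp]
      intro i _ j _
      ring
    · push_cast; ring

-- A in closed form: row i holds the ids i*c, …, i*c+c-1
theorem pv_a_closed (r c : Int) :
    network_matrix r c
      = (List.range r.toNat).map
          (fun i : Nat => (List.range c.toNat).map (fun j : Nat => (i : Int) * c + (j : Int))) := by
  unfold network_matrix
  have hinner :
      (fun (st : List (List Int) × Int) (_ : Int) =>
        let inner := (PySem.List.pyRange 0 c 1).foldl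
          (fun (s : List Int × Int) _ => (s.1 ++ [s.2], s.2 + 1)) ([], st.2)
        (st.1 ++ [inner.1], inner.2))
      = (fun (st : List (List Int) × Int) (_ : Int) =>
        let inner := ((List.range c.toNat).map (fun j : Nat => st.2 + (j : Int)),
                      st.2 + (c.toNat : Int))
        (st.1 ++ [inner.1], inner.2)) := by
    funext st x
    rw [pv_inner_fold]
    simp [PySem.List.length_pyRange_one]
  rw [hinner, pv_outer_fold]
  simp only [List.nil_append, PySem.List.length_pyRange_one, Int.sub_zero]
  apply List.map_congr_left
  intro i _
  apply List.map_congr_left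
  intro j _
  by_cases hc : 0 ≤ c
  · rw [Int.toNat_of_nonneg hc]; ring
  · have h0 : c.toNat = 0 := by omega
    simp [h0] at *

-- B's countdown loop in closed form (by induction on the remaining count)
theorem pv_alt_loop (n : Nat) (c : Int) (rows : List (List Int)) :
    pvAltLoop (n : Int) c rows
      = rows ++ ((List.range n).map
          (fun k : Nat => PySem.List.pyRange ((k : Int) * c) ((k : Int) * c + c) 1)).reverse := by
  induction n generalizing rows with
  | zero => rw [pvAltLoop]; simp
  | succ m ih =>
    rw [pvAltLoop]
    have hpos : (0 : Int) < ((m + 1 : Nat) : Int) := by push_cast; omega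
    rw [if_pos hpos]
    have h1 : ((m + 1 : Nat) : Int) - 1 = (m : Int) := by push_cast; ring
    have h2 : ((m + 1 : Nat) : Int) * c = (m : Int) * c + c := by push_cast; ring
    rw [h1, h2, ih]
    rw [List.range_succ, List.map_append, List.reverse_append]
    simp [List.append_assoc]

-- B in the same closed form
theorem pv_b_closed (r c : Int) :
    network_matrix_alt r c
      = (List.range r.toNat).map
          (fun k : Nat => PySem.List.pyRange ((k : Int) * c) ((k : Int) * c + c) 1) := by
  unfold network_matrix_alt
  by_cases hr : 0 ≤ r
  · have h1 : r = ((r.toNat : Nat) : Int) := by omega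
    rw [h1, pv_alt_loop]
    have h2 : (max r 0).toNat = r.toNat := by omega
    simp [h2]
  · have h0 : r.toNat = 0 := by omega
    rw [pvAltLoop]
    rw [if_neg (by omega)]
    simp [h0]

-- ===== VERDICT =====
theorem network_matrix_spec : Claim_equal_network_matrix := by
  intro r c _
  unfold Spec_network_matrix
  rw [pv_a_closed, pv_b_closed]
  apply List.map_congr_left
  intro i _
  rw [PySem.List.pyRange_one]
  have h : ((i : Int) * c + c - (i : Int) * c) = c := by ring
  rw [h]
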